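-- pv_equiv track=rewrite | github.com/rudvincci/ierahkwa-platform | 08-dotnet/banking/inkg/fix_solution_organization.py | categorize_projects
-- ===== SOURCE A (Python) =====
-- def categorize_projects(projects):
--     """Categorize projects into logical groups"""
--     categories = {
--         'Core Framework': [],
--         'Shared Libraries': [],
--         'Citizen Management': [],
--         'Citizenship Services': [],
--         'Passport Services': [],
--         'Diplomat Services': [],
--         'Portal & Gateway': [],
--         'Support Services': [],
--         'Saga Services': [],
--         'Tests': []
--     }
--
--     for project in projects:
--         if 'Tests' in project:
--             categories['Tests'].append(project)
--         elif 'Shared' in project: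
--             categories['Shared Libraries'].append(project)
--         elif 'CitizenManagement' in project and 'Saga' not in project:
--             categories['Citizen Management'].append(project)
--         elif 'Citizenship' in project:
--             categories['Citizenship Services'].append(project)
--         elif 'Passport' in project and 'Saga' not in project:
--             categories['Passport Services'].append(project)
--         elif 'Diplomat' in project and 'Saga' not in project:
--             categories['Diplomat Services'].append(project)
--         elif 'Portal' in project or 'Gateway' in project:
--             categories['Portal & Gateway'].append(project)
--         elif 'Saga' in project:
--             categories['Saga Services'].append(project)
--         elif 'Notification' in project or 'Operation' in project or 'Payment' in project:
--             categories['Support Services'].append(project)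
--         else:
--             categories['Core Framework'].append(project)
--
--     return categories
-- ===== SOURCE B (Python) =====
-- # Category-major re-implementation: instead of dispatching each project through
-- # the branch chain, run one sifting pass per category over the still-unmatched
-- # projects (earlier categories claim their projects first), Core Framework last.
-- RULES = [
--     ('Tests', lambda p: 'Tests' in p),
--     ('Shared Libraries', lambda p: 'Shared' in p),
--     ('Citizen Management', lambda p: 'CitizenManagement' in p and 'Saga' not in p),
--     ('Citizenship Services', lambda p: 'Citizenship' in p),
--     ('Passport Services', lambda p: 'Passport' in p and 'Saga' not in p),
--     ('Diplomat Services', lambda p: 'Diplomat' in p and 'Saga' not in p),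
--     ('Portal & Gateway', lambda p: 'Portal' in p or 'Gateway' in p),
--     ('Saga Services', lambda p: 'Saga' in p),
--     ('Support Services', lambda p: 'Notification' in p or 'Operation' in p or 'Payment' in p),
-- ]
--
-- def categorize_projects(projects):
--     """Categorize projects into logical groups"""
--     categories = {
--         'Core Framework': [],
--         'Shared Libraries': [],
--         'Citizen Management': [],
--         'Citizenship Services': [],
--         'Passport Services': [],
--         'Diplomat Services': [],
--         'Portal & Gateway': [],
--         'Support Services': [],
--         'Saga Services': [],
--         'Tests': []
--     }
--     remaining = list(projects)
--     for name, pred in RULES: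
--         matched, rest = [], []
--         for p in remaining:
--             (matched if pred(p) else rest).append(p)
--         categories[name] = matched
--         remaining = rest
--     categories['Core Framework'] = remaining
--     return categories
-- ===== Notes on version B (the rewrite author's own statement) =====
-- stated objective: alternative
-- what changed: Replaces A's per-project elif dispatch with a category-major algorithm: one sifting pass per category over the still-unmatched projects (each pass partitions the remainder into matched/rest), assigning each category its whole list at once and giving Core Framework the final remainder.
import Mathlib
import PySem

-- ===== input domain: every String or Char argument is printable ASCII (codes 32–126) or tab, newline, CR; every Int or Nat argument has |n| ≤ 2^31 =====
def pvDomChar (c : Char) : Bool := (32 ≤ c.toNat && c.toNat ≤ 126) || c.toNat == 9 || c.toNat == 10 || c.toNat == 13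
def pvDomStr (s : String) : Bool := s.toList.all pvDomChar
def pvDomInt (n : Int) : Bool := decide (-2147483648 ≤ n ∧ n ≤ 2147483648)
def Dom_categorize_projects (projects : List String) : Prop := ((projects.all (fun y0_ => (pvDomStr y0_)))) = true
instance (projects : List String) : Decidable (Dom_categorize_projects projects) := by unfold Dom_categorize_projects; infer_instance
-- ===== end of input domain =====

-- B replaces A's per-project elif dispatch by a category-major algorithm: one
-- sifting pass per category over the still-unmatched projects, Core Framework last.


-- ===== PORT A =====
-- the nine branch conditions of A's chain, named once
def pvQ1 (p : String) : Bool := PySem.Str.isIn "Tests" p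
def pvQ2 (p : String) : Bool := PySem.Str.isIn "Shared" p
def pvQ3 (p : String) : Bool := PySem.Str.isIn "CitizenManagement" p && !PySem.Str.isIn "Saga" p
def pvQ4 (p : String) : Bool := PySem.Str.isIn "Citizenship" p
def pvQ5 (p : String) : Bool := PySem.Str.isIn "Passport" p && !PySem.Str.isIn "Saga" p
def pvQ6 (p : String) : Bool := PySem.Str.isIn "Diplomat" p && !PySem.Str.isIn "Saga" p
def pvQ7 (p : String) : Bool := PySem.Str.isIn "Portal" p || PySem.Str.isIn "Gateway" p
def pvQ8 (p : String) : Bool := PySem.Str.isIn "Saga" p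
def pvQ9 (p : String) : Bool := PySem.Str.isIn "Notification" p || PySem.Str.isIn "Operation" p || PySem.Str.isIn "Payment" p

-- the initial dict literal (identical text in both Pythons, shared here)
def pvInitCats : PySem.Dict String (List String) :=
  PySem.Dict.ofList
    [("Core Framework", []), ("Shared Libraries", []), ("Citizen Management", []),
     ("Citizenship Services", []), ("Passport Services", []), ("Diplomat Services", []),
     ("Portal & Gateway", []), ("Support Services", []), ("Saga Services", []), ("Tests", [])]

-- one iteration of A's for-loop: the if/elif chain, each branch appending to its key
def pvStepA (d : PySem.Dict String (List String)) (p : String) : PySem.Dict String (List String) :=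
  if pvQ1 p then d.modify "Tests" [] (· ++ [p])
  else if pvQ2 p then d.modify "Shared Libraries" [] (· ++ [p])
  else if pvQ3 p then d.modify "Citizen Management" [] (· ++ [p])
  else if pvQ4 p then d.modify "Citizenship Services" [] (· ++ [p])
  else if pvQ5 p then d.modify "Passport Services" [] (· ++ [p])
  else if pvQ6 p then d.modify "Diplomat Services" [] (· ++ [p])
  else if pvQ7 p then d.modify "Portal & Gateway" [] (· ++ [p])
  else if pvQ8 p then d.modify "Saga Services" [] (· ++ [p])
  else if pvQ9 p then d.modify "Support Services" [] (· ++ [p])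
  else d.modify "Core Framework" [] (· ++ [p])

def categorize_projects (projects : List String) : List (String × List String) :=
  (projects.foldl pvStepA pvInitCats).items

-- ===== PORT B =====
-- B's module-level RULES table: ordered (category, predicate) pairs
def pvRules : List (String × (String → Bool)) :=
  [("Tests", pvQ1), ("Shared Libraries", pvQ2), ("Citizen Management", pvQ3),
   ("Citizenship Services", pvQ4), ("Passport Services", pvQ5), ("Diplomat Services", pvQ6),
   ("Portal & Gateway", pvQ7), ("Saga Services", pvQ8), ("Support Services", pvQ9)]

-- B's inner loop: append each remaining project to matched or rest
def pvSift (pred : String → Bool) (remaining : List String) : List String × List String :=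
  remaining.foldl (fun acc p => if pred p then (acc.1 ++ [p], acc.2) else (acc.1, acc.2 ++ [p])) ([], [])

-- B's outer for-loop over RULES: assign matched to the category, keep sifting the rest
def pvLoopB : List (String × (String → Bool)) → PySem.Dict String (List String) → List String →
    PySem.Dict String (List String) × List String
  | [], d, remaining => (d, remaining)
  | (name, pred) :: rest, d, remaining =>
      let mr := pvSift pred remaining
      pvLoopB rest (d.insert name mr.1) mr.2

def categorize_projects_alt (projects : List String) : List (String × List String) :=
  let dr := pvLoopB pvRules pvInitCats projects
  (dr.1.insert "Core Framework" dr.2).items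

-- ===== PRECONDITION & SPEC =====
def Spec_categorize_projects (projects : List String) (out : List (String × List String)) : Prop := out = categorize_projects_alt projects
instance (projects : List String) (out : List (String × List String)) : Decidable (Spec_categorize_projects projects out) := by unfold Spec_categorize_projects; infer_instance

-- ===== CLAIM (what is proved, stated in full; the proofs are below) =====
def Claim_equal_categorize_projects : Prop := ∀ (projects : List String), Dom_categorize_projects projects → Spec_categorize_projects projects (categorize_projects projects)

-- ===== LEMMAS AND PROOFS =====

-- the successive remainders of B's sifting passes, as filters
def pvRem1 (ps : List String) : List String := ps.filter (fun p => !pvQ1 p)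
def pvRem2 (ps : List String) : List String := (pvRem1 ps).filter (fun p => !pvQ2 p)
def pvRem3 (ps : List String) : List String := (pvRem2 ps).filter (fun p => !pvQ3 p)
def pvRem4 (ps : List String) : List String := (pvRem3 ps).filter (fun p => !pvQ4 p)
def pvRem5 (ps : List String) : List String := (pvRem4 ps).filter (fun p => !pvQ5 p)
def pvRem6 (ps : List String) : List String := (pvRem5 ps).filter (fun p => !pvQ6 p)
def pvRem7 (ps : List String) : List String := (pvRem6 ps).filter (fun p => !pvQ7 p)
def pvRem8 (ps : List String) : List String := (pvRem7 ps).filter (fun p => !pvQ8 p)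
def pvRem9 (ps : List String) : List String := (pvRem8 ps).filter (fun p => !pvQ9 p)

-- the common normal form: the ten categories, keys in dict-literal order,
-- each holding the matches of its sifting stage, prefixed by an accumulator
def pvNF (cf a2 a3 a4 a5 a6 a7 a8 a9 aT : List String) (ps : List String) :
    List (String × List String) :=
  [("Core Framework", cf ++ pvRem9 ps),
   ("Shared Libraries", a2 ++ (pvRem1 ps).filter pvQ2),
   ("Citizen Management", a3 ++ (pvRem2 ps).filter pvQ3),
   ("Citizenship Services", a4 ++ (pvRem3 ps).filter pvQ4),
   ("Passport Services", a5 ++ (pvRem4 ps).filter pvQ5),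
   ("Diplomat Services", a6 ++ (pvRem5 ps).filter pvQ6),
   ("Portal & Gateway", a7 ++ (pvRem6 ps).filter pvQ7),
   ("Support Services", a8 ++ (pvRem8 ps).filter pvQ9),
   ("Saga Services", a9 ++ (pvRem7 ps).filter pvQ8),
   ("Tests", aT ++ ps.filter pvQ1)]

-- a dict state of A's loop with the ten accumulated lists
def pvMk (cf a2 a3 a4 a5 a6 a7 a8 a9 aT : List String) : PySem.Dict String (List String) :=
  PySem.Dict.mk
    [("Core Framework", cf), ("Shared Libraries", a2), ("Citizen Management", a3),
     ("Citizenship Services", a4), ("Passport Services", a5), ("Diplomat Services", a6),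
     ("Portal & Gateway", a7), ("Support Services", a8), ("Saga Services", a9), ("Tests", aT)]

theorem pvSift_eq (pred : String → Bool) (xs : List String) :
    pvSift pred xs = (xs.filter pred, xs.filter (fun p => !pred p)) := by
  have h : ∀ (ys : List String) (m r : List String),
      ys.foldl (fun acc p => if pred p then (acc.1 ++ [p], acc.2) else (acc.1, acc.2 ++ [p])) (m, r) =
        (m ++ ys.filter pred, r ++ ys.filter (fun p => !pred p)) := by
    intro ys
    induction ys with
    | nil => intro m r; simp
    | cons y ys ih =>
        intro m r
        by_cases hy : pred y = true <;> simp [hy, ih]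
  simpa using h xs [] []

theorem foldA_items (ps : List String) : ∀ cf a2 a3 a4 a5 a6 a7 a8 a9 aT,
    (ps.foldl pvStepA (pvMk cf a2 a3 a4 a5 a6 a7 a8 a9 aT)).items =
      pvNF cf a2 a3 a4 a5 a6 a7 a8 a9 aT ps := by
  induction ps with
  | nil =>
      intro cf a2 a3 a4 a5 a6 a7 a8 a9 aT
      simp [pvNF, pvRem1, pvRem2, pvRem3, pvRem4, pvRem5, pvRem6, pvRem7, pvRem8, pvRem9, pvMk]
  | cons p ps ih =>
      intro cf a2 a3 a4 a5 a6 a7 a8 a9 aT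
      simp only [List.foldl_cons, pvStepA]
      split_ifs with h1 h2 h3 h4 h5 h6 h7 h8 h9
      · rw [show PySem.Dict.modify (pvMk cf a2 a3 a4 a5 a6 a7 a8 a9 aT) "Tests" [] (· ++ [p]) =
              pvMk cf a2 a3 a4 a5 a6 a7 a8 a9 (aT ++ [p]) from rfl, ih]
        simp_all [pvNF, pvRem1, pvRem2, pvRem3, pvRem4, pvRem5, pvRem6, pvRem7, pvRem8, pvRem9]
      · rw [show PySem.Dict.modify (pvMk cf a2 a3 a4 a5 a6 a7 a8 a9 aT) "Shared Libraries" [] (· ++ [p]) =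
              pvMk cf (a2 ++ [p]) a3 a4 a5 a6 a7 a8 a9 aT from rfl, ih]
        simp_all [pvNF, pvRem1, pvRem2, pvRem3, pvRem4, pvRem5, pvRem6, pvRem7, pvRem8, pvRem9]
      · rw [show PySem.Dict.modify (pvMk cf a2 a3 a4 a5 a6 a7 a8 a9 aT) "Citizen Management" [] (· ++ [p]) =
              pvMk cf a2 (a3 ++ [p]) a4 a5 a6 a7 a8 a9 aT from rfl, ih]
        simp_all [pvNF, pvRem1, pvRem2, pvRem3, pvRem4, pvRem5, pvRem6, pvRem7, pvRem8, pvRem9]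
      · rw [show PySem.Dict.modify (pvMk cf a2 a3 a4 a5 a6 a7 a8 a9 aT) "Citizenship Services" [] (· ++ [p]) =
              pvMk cf a2 a3 (a4 ++ [p]) a5 a6 a7 a8 a9 aT from rfl, ih]
        simp_all [pvNF, pvRem1, pvRem2, pvRem3, pvRem4, pvRem5, pvRem6, pvRem7, pvRem8, pvRem9]
      · rw [show PySem.Dict.modify (pvMk cf a2 a3 a4 a5 a6 a7 a8 a9 aT) "Passport Services" [] (· ++ [p]) =
              pvMk cf a2 a3 a4 (a5 ++ [p]) a6 a7 a8 a9 aT from rfl, ih]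
        simp_all [pvNF, pvRem1, pvRem2, pvRem3, pvRem4, pvRem5, pvRem6, pvRem7, pvRem8, pvRem9]
      · rw [show PySem.Dict.modify (pvMk cf a2 a3 a4 a5 a6 a7 a8 a9 aT) "Diplomat Services" [] (· ++ [p]) =
              pvMk cf a2 a3 a4 a5 (a6 ++ [p]) a7 a8 a9 aT from rfl, ih]
        simp_all [pvNF, pvRem1, pvRem2, pvRem3, pvRem4, pvRem5, pvRem6, pvRem7, pvRem8, pvRem9]
      · rw [show PySem.Dict.modify (pvMk cf a2 a3 a4 a5 a6 a7 a8 a9 aT) "Portal & Gateway" [] (· ++ [p]) =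
              pvMk cf a2 a3 a4 a5 a6 (a7 ++ [p]) a8 a9 aT from rfl, ih]
        simp_all [pvNF, pvRem1, pvRem2, pvRem3, pvRem4, pvRem5, pvRem6, pvRem7, pvRem8, pvRem9]
      · rw [show PySem.Dict.modify (pvMk cf a2 a3 a4 a5 a6 a7 a8 a9 aT) "Saga Services" [] (· ++ [p]) =
              pvMk cf a2 a3 a4 a5 a6 a7 a8 (a9 ++ [p]) aT from rfl, ih]
        simp_all [pvNF, pvRem1, pvRem2, pvRem3, pvRem4, pvRem5, pvRem6, pvRem7, pvRem8, pvRem9]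
      · rw [show PySem.Dict.modify (pvMk cf a2 a3 a4 a5 a6 a7 a8 a9 aT) "Support Services" [] (· ++ [p]) =
              pvMk cf a2 a3 a4 a5 a6 a7 (a8 ++ [p]) a9 aT from rfl, ih]
        simp_all [pvNF, pvRem1, pvRem2, pvRem3, pvRem4, pvRem5, pvRem6, pvRem7, pvRem8, pvRem9]
      · rw [show PySem.Dict.modify (pvMk cf a2 a3 a4 a5 a6 a7 a8 a9 aT) "Core Framework" [] (· ++ [p]) =
              pvMk (cf ++ [p]) a2 a3 a4 a5 a6 a7 a8 a9 aT from rfl, ih]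
        simp_all [pvNF, pvRem1, pvRem2, pvRem3, pvRem4, pvRem5, pvRem6, pvRem7, pvRem8, pvRem9]

theorem pvIns0 (a1 a2 a3 a4 a5 a6 a7 a8 a9 aT v : List String) :
    (pvMk a1 a2 a3 a4 a5 a6 a7 a8 a9 aT).insert "Core Framework" v =
      pvMk v a2 a3 a4 a5 a6 a7 a8 a9 aT := rfl

theorem pvIns1 (a1 a2 a3 a4 a5 a6 a7 a8 a9 aT v : List String) :
    (pvMk a1 a2 a3 a4 a5 a6 a7 a8 a9 aT).insert "Shared Libraries" v =
      pvMk a1 v a3 a4 a5 a6 a7 a8 a9 aT := rfl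

theorem pvIns2 (a1 a2 a3 a4 a5 a6 a7 a8 a9 aT v : List String) :
    (pvMk a1 a2 a3 a4 a5 a6 a7 a8 a9 aT).insert "Citizen Management" v =
      pvMk a1 a2 v a4 a5 a6 a7 a8 a9 aT := rfl

theorem pvIns3 (a1 a2 a3 a4 a5 a6 a7 a8 a9 aT v : List String) :
    (pvMk a1 a2 a3 a4 a5 a6 a7 a8 a9 aT).insert "Citizenship Services" v =
      pvMk a1 a2 a3 v a5 a6 a7 a8 a9 aT := rfl

theorem pvIns4 (a1 a2 a3 a4 a5 a6 a7 a8 a9 aT v : List String) :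
    (pvMk a1 a2 a3 a4 a5 a6 a7 a8 a9 aT).insert "Passport Services" v =
      pvMk a1 a2 a3 a4 v a6 a7 a8 a9 aT := rfl

theorem pvIns5 (a1 a2 a3 a4 a5 a6 a7 a8 a9 aT v : List String) :
    (pvMk a1 a2 a3 a4 a5 a6 a7 a8 a9 aT).insert "Diplomat Services" v =
      pvMk a1 a2 a3 a4 a5 v a7 a8 a9 aT := rfl

theorem pvIns6 (a1 a2 a3 a4 a5 a6 a7 a8 a9 aT v : List String) :
    (pvMk a1 a2 a3 a4 a5 a6 a7 a8 a9 aT).insert "Portal & Gateway" v =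
      pvMk a1 a2 a3 a4 a5 a6 v a8 a9 aT := rfl

theorem pvIns7 (a1 a2 a3 a4 a5 a6 a7 a8 a9 aT v : List String) :
    (pvMk a1 a2 a3 a4 a5 a6 a7 a8 a9 aT).insert "Support Services" v =
      pvMk a1 a2 a3 a4 a5 a6 a7 v a9 aT := rfl

theorem pvIns8 (a1 a2 a3 a4 a5 a6 a7 a8 a9 aT v : List String) :
    (pvMk a1 a2 a3 a4 a5 a6 a7 a8 a9 aT).insert "Saga Services" v =
      pvMk a1 a2 a3 a4 a5 a6 a7 a8 v aT := rfl

theorem pvIns9 (a1 a2 a3 a4 a5 a6 a7 a8 a9 aT v : List String) :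
    (pvMk a1 a2 a3 a4 a5 a6 a7 a8 a9 aT).insert "Tests" v =
      pvMk a1 a2 a3 a4 a5 a6 a7 a8 a9 v := rfl

theorem altB_eq_NF (ps : List String) :
    categorize_projects_alt ps = pvNF [] [] [] [] [] [] [] [] [] [] ps := by
  simp only [categorize_projects_alt, pvRules, pvLoopB, pvSift_eq,
    (by decide : pvInitCats = pvMk [] [] [] [] [] [] [] [] [] []),
    pvIns0, pvIns1, pvIns2, pvIns3, pvIns4, pvIns5, pvIns6, pvIns7, pvIns8, pvIns9]
  simp [pvNF, pvRem1, pvRem2, pvRem3, pvRem4, pvRem5, pvRem6, pvRem7, pvRem8, pvRem9, pvMk]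

-- ===== VERDICT (by name: the statement is the Claim_ definition above) =====
theorem categorize_projects_spec : Claim_equal_categorize_projects := by
  intro projects _
  unfold Spec_categorize_projects categorize_projects
  rw [altB_eq_NF, (by decide : pvInitCats = pvMk [] [] [] [] [] [] [] [] [] []), foldA_items]
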